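-- pv_equiv track=rewrite | github.com/BFl47/1.1.Fondamenti-di-Informatica-I | 3.Esami/Esame20210218/Compiti/CompitoA/Ex1.py | Ex1
-- ===== SOURCE A (Python) =====
-- def Ex1(l):
--     """MODIFICARE IL CONTENUTO DI QUESTA FUNZIONE PER SVOLGERE L'ESERCIZIO"""
-- ##    ins = set()
-- ##    for parola in l:
-- ##        if parola == parola[::-1]:
-- ##            ins.add(parola)
-- ##    if ins == set():
-- ##        ins = set(l)
-- ##        return ins
-- ##    n = 0
-- ##    massimo = ''
-- ##    for elem in ins:
-- ##        if len(elem) > n: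
-- ##            n = len(elem)
-- ##            massimo = elem
-- ##    ris = set()
-- ##    ris.add(massimo)
-- ##    for parola in l:
-- ##        if len(parola) >= n*2:
-- ##            count = 0
-- ##            for i in range(n):
-- ##                if parola[i] == parola[-(i+1)]:
-- ##                    count += 1
-- ##            if count == n:
-- ##                ris.add(parola)
-- ##
-- ##    return ris
--
--     ris = set()
--     massimo = 0
--     for s in l:
--         invs = s[::-1]
--         i = 0
--         uguali = True
--         while uguali and i < len(s):
--             if s[i] == invs[i]:
--                 i += 1
--             else:
--                 uguali = False
--         if i > massimo:
--             massimo = i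
--             ris = {s}
--         elif i == massimo:
--             ris.add(s)
--     return ris
-- ===== SOURCE B (Python) =====
-- def _match(s):
--     i = 0
--     n = len(s)
--     while i < n and s[i] == s[n - 1 - i]:
--         i += 1
--     return i
--
-- def Ex1(l):
--     if not l:
--         return set()
--     m = max(_match(s) for s in l)
--     return {s for s in l if _match(s) == m}
-- ===== Notes on version B (the rewrite author's own statement) =====
-- stated objective: simpler
-- what changed: Replaced A's single-pass running-max-with-reset accumulation by a two-phase organization: a helper computing each string's mirror-match prefix length, then the global max, then a set comprehension filtering the strings attaining it.
import Mathlib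
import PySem

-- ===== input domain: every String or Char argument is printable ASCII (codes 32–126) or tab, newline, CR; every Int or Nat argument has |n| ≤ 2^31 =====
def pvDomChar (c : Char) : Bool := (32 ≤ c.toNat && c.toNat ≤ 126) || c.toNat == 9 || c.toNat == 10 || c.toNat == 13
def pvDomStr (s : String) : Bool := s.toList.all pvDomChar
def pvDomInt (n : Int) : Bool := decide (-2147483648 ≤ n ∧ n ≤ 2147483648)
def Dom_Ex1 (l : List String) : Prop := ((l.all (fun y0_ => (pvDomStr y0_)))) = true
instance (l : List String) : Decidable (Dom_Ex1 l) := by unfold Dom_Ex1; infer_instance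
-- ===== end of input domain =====

-- B replaces A's single-pass running-max-with-reset by a two-phase compute-then-filter
-- organization (helper match length, then max, then set comprehension): objective 'simpler'.

-- ===== PORT A =====
-- A's inner 'while uguali and i < len(s)' loop, with the boolean flag kept as in the source
def aLoop (cs invs : List Char) (i : Nat) (uguali : Bool) : Nat :=
  if h : uguali = true ∧ i < cs.length then
    if cs[i]? = invs[i]? then aLoop cs invs (i + 1) true
    else aLoop cs invs i false
  else i
termination_by (cs.length - i) + (if uguali then 1 else 0)
decreasing_by
  all_goals first
    | (simp [h.1]; omega)
    | simp [h.1]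

def Ex1 (l : List String) : List String :=
  (l.foldl (fun (st : Nat × PySem.Set String) s =>
      let cs := s.toList
      let invs := cs.reverse
      let i := aLoop cs invs 0 true
      if i > st.1 then (i, PySem.Set.ofList [s])
      else if i = st.1 then (st.1, PySem.Set.add st.2 s)
      else st)
    (0, PySem.Set.empty)).2

-- ===== PORT B =====
-- Source B's helper _match(s): while i < n and s[i] == s[n-1-i]
def bMatch (cs : List Char) (i : Nat) : Nat :=
  if i < cs.length then
    if cs[i]? = cs[cs.length - 1 - i]? then bMatch cs (i + 1) else i
  else i
termination_by cs.length - i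

def Ex1_alt (l : List String) : List String :=
  match l with
  | [] => []
  | s :: t =>
    -- m = max(_match(s) for s in l): first value as the running max's start
    let m := t.foldl (fun a x => max a (bMatch x.toList 0)) (bMatch s.toList 0)
    PySem.Set.ofList ((s :: t).filter (fun x => bMatch x.toList 0 = m))

-- ===== PRECONDITION & SPEC =====
def Spec_Ex1 (l : List String) (out : List String) : Prop := out = Ex1_alt l
instance (l : List String) (out : List String) : Decidable (Spec_Ex1 l out) := by unfold Spec_Ex1; infer_instance

-- ===== CLAIM (what is proved, stated in full; the proofs are below) =====
def Claim_equal_Ex1 : Prop := ∀ (l : List String), Dom_Ex1 l → Spec_Ex1 l (Ex1 l)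

-- ===== LEMMAS AND PROOFS =====

-- the two mirror-match computations agree
theorem aLoop_eq_bMatch (cs : List Char) (i : Nat) : aLoop cs cs.reverse i true = bMatch cs i := by
  rw [aLoop, bMatch]
  by_cases h : i < cs.length
  · rw [dif_pos ⟨rfl, h⟩, if_pos h, List.getElem?_reverse h]
    by_cases he : cs[i]? = cs[cs.length - 1 - i]?
    · rw [if_pos he, if_pos he]
      exact aLoop_eq_bMatch cs (i + 1)
    · rw [if_neg he, if_neg he, aLoop, dif_neg (by simp)]
  · rw [dif_neg (by omega), if_neg h]
termination_by cs.length - i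

-- abbreviations used only by the proofs
def fB (s : String) : Nat := bMatch s.toList 0

def aStep (st : Nat × PySem.Set String) (s : String) : Nat × PySem.Set String :=
  if fB s > st.1 then (fB s, PySem.Set.ofList [s])
  else if fB s = st.1 then (st.1, PySem.Set.add st.2 s)
  else st

def maxF (l : List String) (m : Nat) : Nat := l.foldl (fun a s => max a (fB s)) m

theorem Ex1_eq_fold (l : List String) :
    Ex1 l = (l.foldl aStep (0, PySem.Set.empty)).2 := by
  unfold Ex1
  congr 1
  apply PySem.List.foldl_congr_mem
  intro st s _
  simp only [aStep, aLoop_eq_bMatch, fB]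
  rfl

theorem maxF_of_all (l : List String) (m : Nat) (h : ∀ x ∈ l, fB x ≤ m) : maxF l m = m := by
  induction l with
  | nil => rfl
  | cons s t ih =>
    have hs : max m (fB s) = m := by
      have := h s (by simp); omega
    simp only [maxF, List.foldl_cons, hs]
    exact ih (fun x hx => h x (by simp [hx]))

theorem maxF_mono (l : List String) (m m' : Nat) (h : m ≤ m') : maxF l m ≤ maxF l m' := by
  induction l generalizing m m' with
  | nil => exact h
  | cons s t ih =>
    simp only [maxF, List.foldl_cons] at *
    exact ih _ _ (by omega)

theorem le_maxF (l : List String) (m : Nat) : m ≤ maxF l m := by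
  induction l generalizing m with
  | nil => exact Nat.le_refl m
  | cons s t ih =>
    simp only [maxF, List.foldl_cons]
    exact le_trans (Nat.le_max_left m (fB s)) (ih _)

theorem maxF_gt_of_not_all (l : List String) (m : Nat) (h : ¬ ∀ x ∈ l, fB x ≤ m) :
    m < maxF l m := by
  induction l generalizing m with
  | nil => exact absurd (by simp) h
  | cons s t ih =>
    rw [show maxF (s :: t) m = maxF t (max m (fB s)) from rfl]
    by_cases hs : fB s ≤ m
    · have ht : ¬ ∀ x ∈ t, fB x ≤ m := by
        intro hall
        apply h
        intro x hx
        rcases List.mem_cons.1 hx with rfl | hx'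
        · exact hs
        · exact hall x hx'
      have h1 := ih m ht
      have h2 := maxF_mono t m (max m (fB s)) (Nat.le_max_left _ _)
      omega
    · have h2 := le_maxF t (max m (fB s))
      omega

theorem fB_def (s : String) : bMatch s.toList 0 = fB s := rfl

theorem ofList_cons (s : String) (xs : List String) :
    PySem.Set.ofList (s :: xs) = List.foldl PySem.Set.add [s] xs := rfl

-- invariant of A's running-max-with-reset fold
theorem key (l : List String) (m : Nat) (r : PySem.Set String) :
    (l.foldl aStep (m, r)).2 =
      if ∀ x ∈ l, fB x ≤ m then List.foldl PySem.Set.add r (l.filter (fun s => fB s = m))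
      else PySem.Set.ofList (l.filter (fun s => fB s = maxF l m)) := by
  induction l generalizing m r with
  | nil => simp
  | cons s t ih =>
    simp only [List.foldl_cons]
    rcases Nat.lt_trichotomy m (fB s) with hgt | heq | hlt
    · -- f s > m : reset
      have hstep : aStep (m, r) s = (fB s, PySem.Set.ofList [s]) := by
        simp [aStep, hgt]
      rw [hstep, ih]
      have hnotall : ¬ ∀ x ∈ s :: t, fB x ≤ m := by
        intro hall; have := hall s (by simp); omega
      rw [if_neg hnotall]
      have hmax : maxF (s :: t) m = maxF t (fB s) := by
        simp [maxF, Nat.max_eq_right (Nat.le_of_lt hgt)]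
      by_cases hall : ∀ x ∈ t, fB x ≤ fB s
      · rw [if_pos hall, hmax, maxF_of_all t (fB s) hall,
          List.filter_cons_of_pos (by simp),
          show PySem.Set.ofList [s] = ([s] : List String) from rfl, ofList_cons]
      · rw [if_neg hall, hmax]
        have hL : fB s < maxF t (fB s) := maxF_gt_of_not_all t (fB s) hall
        rw [List.filter_cons_of_neg (by simp; omega)]
    · -- f s = m : add
      have hstep : aStep (m, r) s = (m, PySem.Set.add r s) := by
        simp [aStep, heq.symm]
      rw [hstep, ih]
      have hmax : maxF (s :: t) m = maxF t m := by
        simp [maxF, ← heq]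
      by_cases hall : ∀ x ∈ t, fB x ≤ m
      · have hcons : ∀ x ∈ s :: t, fB x ≤ m := by
          intro x hx
          rcases List.mem_cons.1 hx with rfl | hx'
          · omega
          · exact hall x hx'
        rw [if_pos hall, if_pos hcons,
          List.filter_cons_of_pos (by simp; omega), List.foldl_cons]
      · have hnotall : ¬ ∀ x ∈ s :: t, fB x ≤ m := by
          intro hcons; exact hall (fun x hx => hcons x (by simp [hx]))
        rw [if_neg hall, if_neg hnotall, hmax]
        have hL : m < maxF t m := maxF_gt_of_not_all t m hall
        rw [List.filter_cons_of_neg (by simp; omega)]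
    · -- f s < m : skip
      have hstep : aStep (m, r) s = (m, r) := by
        simp only [aStep]
        rw [if_neg (by omega), if_neg (by omega)]
      rw [hstep, ih]
      have hmax : maxF (s :: t) m = maxF t m := by
        simp [maxF, Nat.max_eq_left (Nat.le_of_lt hlt)]
      by_cases hall : ∀ x ∈ t, fB x ≤ m
      · have hcons : ∀ x ∈ s :: t, fB x ≤ m := by
          intro x hx
          rcases List.mem_cons.1 hx with rfl | hx'
          · omega
          · exact hall x hx'
        rw [if_pos hall, if_pos hcons,
          List.filter_cons_of_neg (by simp; omega)]
      · have hnotall : ¬ ∀ x ∈ s :: t, fB x ≤ m := by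
          intro hcons; exact hall (fun x hx => hcons x (by simp [hx]))
        rw [if_neg hall, if_neg hnotall, hmax]
        have hL : m < maxF t m := maxF_gt_of_not_all t m hall
        rw [List.filter_cons_of_neg (by simp; omega)]

theorem Ex1_main (l : List String) : Ex1 l = Ex1_alt l := by
  rw [Ex1_eq_fold]
  cases l with
  | nil => rfl
  | cons s t =>
    have hstep : aStep (0, PySem.Set.empty) s = (fB s, PySem.Set.ofList [s]) := by
      by_cases h0 : fB s = 0
      · simp [aStep, h0]; rfl
      · simp [aStep, Nat.pos_of_ne_zero h0]
    simp only [List.foldl_cons, hstep, key]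
    by_cases hall : ∀ x ∈ t, fB x ≤ fB s
    · rw [if_pos hall]
      simp only [Ex1_alt, fB_def]
      simp only [show List.foldl (fun a x => max a (fB x)) (fB s) t = maxF t (fB s) from rfl,
        maxF_of_all t (fB s) hall]
      rw [List.filter_cons_of_pos (by simp),
        show PySem.Set.ofList [s] = ([s] : List String) from rfl, ofList_cons]
    · rw [if_neg hall]
      have hL : fB s < maxF t (fB s) := maxF_gt_of_not_all t (fB s) hall
      simp only [Ex1_alt, fB_def]
      simp only [show List.foldl (fun a x => max a (fB x)) (fB s) t = maxF t (fB s) from rfl]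
      rw [List.filter_cons_of_neg (by simp; omega)]

-- ===== VERDICT (by name: the statement is the Claim_ definition above) =====
theorem Ex1_spec : Claim_equal_Ex1 := by
  intro l _
  unfold Spec_Ex1
  exact Ex1_main l
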